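-- pv_equiv track=rewrite | github.com/pipefunc/pipefunc | pipefunc/map/_mapspec.py | shape_to_strides
-- ===== SOURCE A (Python) =====
-- def shape_to_strides(shape: tuple[int, ...]) -> tuple[int, ...]:
--     """Compute strides for a multidimensional array given its shape.
--
--     Parameters
--     ----------
--     shape
--         The dimensions of the array.
--
--     Returns
--     -------
--         The strides for each dimension, where each stride is the product of
--         subsequent dimension sizes.
--
--     """
--     strides = []
--     for i in range(len(shape)):
--         product = 1
--         for j in range(i + 1, len(shape)):
--             product *= shape[j]
--         strides.append(product)
--     return tuple(strides)
-- ===== SOURCE B (Python) =====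
-- def shape_to_strides(shape):
--     """Compute strides in one right-to-left pass with a running suffix product."""
--     strides = []
--     product = 1
--     for dim in reversed(shape):
--         strides.append(product)
--         product *= dim
--     return tuple(reversed(strides))
-- ===== Notes on version B (the rewrite author's own statement) =====
-- stated objective: faster
-- what changed: Replaced the nested loop that recomputes each suffix product from scratch by a single right-to-left pass carrying a running product.
import Mathlib
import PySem

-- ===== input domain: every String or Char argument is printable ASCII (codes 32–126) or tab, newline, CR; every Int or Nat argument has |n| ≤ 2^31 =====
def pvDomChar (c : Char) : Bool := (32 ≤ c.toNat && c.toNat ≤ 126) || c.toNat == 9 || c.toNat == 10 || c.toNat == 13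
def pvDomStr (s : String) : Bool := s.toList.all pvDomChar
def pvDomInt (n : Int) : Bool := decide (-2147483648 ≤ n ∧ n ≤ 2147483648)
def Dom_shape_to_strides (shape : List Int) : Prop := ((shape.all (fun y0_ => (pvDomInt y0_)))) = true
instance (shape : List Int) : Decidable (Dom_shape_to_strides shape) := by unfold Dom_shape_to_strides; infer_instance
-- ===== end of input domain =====

-- B replaces A's quadratic nested loops by one right-to-left pass with a running suffix product (objective: faster, O(n) vs O(n^2)).

-- ===== PORT A =====
-- shape[j] is always in range (i+1 ≤ j < len shape), so pyGetD with default 0 is exact here.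
def shape_to_strides (shape : List Int) : List Int :=
  (PySem.List.pyRange 0 (shape.length : Int) 1).foldl
    (fun strides i =>
      strides ++
        [(PySem.List.pyRange (i + 1) (shape.length : Int) 1).foldl
          (fun product j => product * PySem.List.pyGetD shape j 0) 1])
    []

-- ===== PORT B =====
-- fold over reversed(shape) carrying (strides-so-far, running product); final reversed(strides).
def shape_to_strides_alt (shape : List Int) : List Int :=
  (shape.reverse.foldl
    (fun (st : List Int × Int) dim => (st.1 ++ [st.2], st.2 * dim))
    ([], 1)).1.reverse

-- ===== PRECONDITION & SPEC =====
def Spec_shape_to_strides (shape : List Int) (out : List Int) : Prop := out = shape_to_strides_alt shape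
instance (shape : List Int) (out : List Int) : Decidable (Spec_shape_to_strides shape out) := by unfold Spec_shape_to_strides; infer_instance

-- ===== CLAIM (what is proved, stated in full; the proofs are below) =====
def Claim_equal_shape_to_strides : Prop := ∀ (shape : List Int), Dom_shape_to_strides shape → Spec_shape_to_strides shape (shape_to_strides shape)

-- ===== LEMMAS AND PROOFS =====

-- the common characterization: k-th stride is the product of the dimensions after position k
def pvSfx : List Int → List Int
  | [] => []
  | _ :: t => t.prod :: pvSfx t

lemma range_map_sfx (shape : List Int) :
    (List.range shape.length).map (fun k => (shape.drop (k + 1)).prod) = pvSfx shape := by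
  induction shape with
  | nil => simp [pvSfx]
  | cons d t ih =>
    rw [List.length_cons, List.range_succ_eq_map, List.map_cons, List.map_map]
    simp only [pvSfx, List.drop_succ_cons, List.drop_zero]
    congr 1

lemma shape_to_strides_eq_sfx (shape : List Int) : shape_to_strides shape = pvSfx shape := by
  unfold shape_to_strides
  rw [PySem.List.foldl_append_singleton_eq_map, List.nil_append]
  rw [List.map_congr_left (g := fun i => (shape.drop (i + 1).toNat).prod) ?_]
  · rw [PySem.List.pyRange_one, List.map_map]
    have hlen : ((shape.length : Int) - 0).toNat = shape.length := by omega
    rw [hlen]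
    have hbody : ∀ k ∈ List.range shape.length,
        ((fun i => (shape.drop (i + 1).toNat).prod) ∘ fun k : Nat => (0 : Int) + k) k
          = (shape.drop (k + 1)).prod := by
      intro k _
      simp only [Function.comp]
      congr 2
      omega
    rw [List.map_congr_left hbody]
    exact range_map_sfx shape
  · intro i hi
    have hi' := (PySem.List.mem_pyRange_one).1 hi
    rw [PySem.List.foldl_pyRange_pyGetD' shape 0 (fun acc v => acc * v) 1 (by omega)]
    exact List.prod_eq_foldl.symm

-- B-side: the accumulated stride list in closed form (running prefix products)
def pvPref : List Int → Int → List Int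
  | [], _ => []
  | d :: t, p => p :: pvPref t (p * d)

lemma foldl_pref (l : List Int) (acc : List Int) (p : Int) :
    l.foldl (fun (st : List Int × Int) dim => (st.1 ++ [st.2], st.2 * dim)) (acc, p)
      = (acc ++ pvPref l p, p * l.prod) := by
  induction l generalizing acc p with
  | nil => simp [pvPref]
  | cons d t ih =>
    rw [List.foldl_cons, ih, pvPref]
    simp only [Prod.mk.injEq, List.prod_cons]
    constructor
    · simp
    · ring

lemma pvPref_scale (l : List Int) (p q : Int) :
    pvPref l (p * q) = (pvPref l q).map (p * ·) := by
  induction l generalizing q with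
  | nil => simp [pvPref]
  | cons d t ih =>
    simp only [pvPref, List.map_cons]
    rw [mul_assoc, ih]

lemma pvPref_concat (l : List Int) (d : Int) :
    pvPref (l ++ [d]) 1 = pvPref l 1 ++ [l.prod] := by
  induction l with
  | nil => simp [pvPref]
  | cons x t ih =>
    simp only [List.cons_append, pvPref, one_mul, List.prod_cons]
    have hx : ∀ m : List Int, pvPref m x = (pvPref m 1).map (x * ·) := by
      intro m
      have := pvPref_scale m x 1
      simpa using this
    rw [hx, ih, List.map_append, ← hx]
    simp

lemma pref_reverse_eq_sfx (shape : List Int) :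
    (pvPref shape.reverse 1).reverse = pvSfx shape := by
  induction shape with
  | nil => simp [pvPref, pvSfx]
  | cons d t ih =>
    rw [List.reverse_cons, pvPref_concat, List.reverse_append]
    simp only [List.reverse_cons, List.reverse_nil, List.nil_append, List.prod_reverse]
    rw [ih]
    rfl

lemma shape_to_strides_alt_eq_sfx (shape : List Int) : shape_to_strides_alt shape = pvSfx shape := by
  unfold shape_to_strides_alt
  rw [foldl_pref]
  simpa using pref_reverse_eq_sfx shape

-- ===== VERDICT (by name: the statement is the Claim_ definition above) =====
theorem shape_to_strides_spec : Claim_equal_shape_to_strides := by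
  intro shape _
  unfold Spec_shape_to_strides
  rw [shape_to_strides_eq_sfx, shape_to_strides_alt_eq_sfx]
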